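-- pv_equiv track=rewrite | github.com/rhinomikey/Python-Projects | Session15_Test2Practice/src/practice_problem3.py | practice_problem3c
-- ===== SOURCE A (Python) =====
-- def practice_problem3c(sequence):
--     """
--     What comes in: A non-empty sequence.
--     What goes out: Returns a list of integers,
--       where the integers are the places (indices)
--       where an item in the given sequence appears twice in a row.
--     Side effects: None.
--     Examples:
--       Given sequence (9, 33, 8, 8, 0, 4, 4, 8)
--          -- this function returns [2, 5]
--               since 8 appears twice in a row starting at index 2
--               and 4 appears twice in a row starting at index 5
--
--       Given sequence (9, 9, 9, 9, 0, 9, 9, 9)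
--          -- this function returns [0, 1, 2, 5, 6]
--
--       Given sequence (4, 5, 4, 5, 4, 5, 4)
--          -- this function returns []
--
--       Given sequence 'abbabbb'
--          -- this function returns [1, 4, 5]
--
--     Type hints:
--       :type: sequence: list    or tuple or string
--     """
--     ####################################################################
--     # DONE: 4. Implement and test this function.
--     #     The testing code is already written for you (above).
--     ####################################################################
--     # DIFFICULTY AND TIME RATINGS (see top of this file for explanation)
--     #    DIFFICULTY:      8
--     #    TIME ESTIMATE:   15 minutes.
--     ####################################################################
--     seq=[]
--     length = len(sequence)
--     for i in range(length):
--         if i == length -1: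
--             break
--         elif sequence[i]==sequence[i+1]:
--             seq.append(i)
--     return seq
-- ===== SOURCE B (Python) =====
-- def practice_problem3c(sequence):
--     """Run-length scan: find each maximal run of equal items, then emit the
--     indices of all but the last element of each run."""
--     result = []
--     n = len(sequence)
--     start = 0
--     while start < n:
--         end = start + 1
--         while end < n and sequence[end] == sequence[start]:
--             end += 1
--         result.extend(range(start, end - 1))
--         start = end
--     return result
-- ===== Notes on version B (the rewrite author's own statement) =====
-- stated objective: alternative
-- what changed: Replaces the single pass that compares each adjacent pair sequence[i] == sequence[i+1] with a run-length scan: an inner loop finds the end of each maximal run of equal items and the indices start..end-2 of the run are emitted at once.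
import Mathlib
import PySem

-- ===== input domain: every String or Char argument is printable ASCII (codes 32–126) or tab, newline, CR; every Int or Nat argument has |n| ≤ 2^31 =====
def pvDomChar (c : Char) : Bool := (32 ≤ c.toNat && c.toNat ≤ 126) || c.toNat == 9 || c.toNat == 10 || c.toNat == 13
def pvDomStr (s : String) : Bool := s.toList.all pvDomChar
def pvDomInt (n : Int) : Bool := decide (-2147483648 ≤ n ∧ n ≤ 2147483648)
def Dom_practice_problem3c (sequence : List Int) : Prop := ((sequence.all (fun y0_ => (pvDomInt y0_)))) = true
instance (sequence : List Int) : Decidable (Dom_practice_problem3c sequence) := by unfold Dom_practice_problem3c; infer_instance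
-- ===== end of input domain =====

-- B replaces the adjacent-pair loop with a run-length scan (find each maximal run of
-- equal items, emit all but the last index of each run); objective: alternative, same cost.

-- sequence[i] — every access in both ports happens at an index proved in range, so .getD 0 is exact
def pvGet (s : List Int) (i : Int) : Int := (PySem.List.pyGet? s i).getD 0

-- ===== PORT A =====
-- the for-loop over range(length), with the `break` at i == length-1, as structural recursion on the range list
def pp3GoA (sequence : List Int) (length : Int) : List Int → List Int → List Int
  | [], seq => seq
  | i :: rest, seq =>
      if i = length - 1 then seq
      else if pvGet sequence i = pvGet sequence (i + 1) then
        pp3GoA sequence length rest (seq ++ [i])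
      else pp3GoA sequence length rest seq

def practice_problem3c (sequence : List Int) : List Int :=
  let length := PySem.List.len sequence
  pp3GoA sequence length (PySem.List.pyRange 0 length 1) []

-- ===== PORT B =====
-- inner while: advance end while sequence[end] == sequence[start]
def pp3Inner (s : List Int) (n : Int) (start : Int) (e : Int) : Int :=
  if h : e < n ∧ pvGet s e = pvGet s start then pp3Inner s n start (e + 1) else e
termination_by (n - e).toNat
decreasing_by omega

theorem pp3Inner_ge (s : List Int) (n start : Int) : ∀ e, e ≤ pp3Inner s n start e := by
  intro e
  induction hd : (n - e).toNat using Nat.strong_induction_on generalizing e with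
  | _ m ih =>
    by_cases h : e < n ∧ pvGet s e = pvGet s start
    · rw [pp3Inner, dif_pos h]
      have := ih ((n : Int) - (e + 1)).toNat (by omega) (e + 1) rfl
      omega
    · rw [pp3Inner, dif_neg h]

-- outer while over run starts
def pp3Outer (s : List Int) (n : Int) (start : Int) (acc : List Int) : List Int :=
  if _hs : start < n then
    pp3Outer s n (pp3Inner s n start (start + 1))
      (acc ++ PySem.List.pyRange start (pp3Inner s n start (start + 1) - 1) 1)
  else acc
termination_by (n - start).toNat
decreasing_by
  have := pp3Inner_ge s n start (start + 1)
  omega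

def practice_problem3c_alt (sequence : List Int) : List Int :=
  let n := PySem.List.len sequence
  pp3Outer sequence n 0 []

-- ===== PRECONDITION & SPEC =====
def Spec_practice_problem3c (sequence : List Int) (out : List Int) : Prop := out = practice_problem3c_alt sequence
instance (sequence : List Int) (out : List Int) : Decidable (Spec_practice_problem3c sequence out) := by unfold Spec_practice_problem3c; infer_instance

-- ===== CLAIM (what is proved, stated in full; the proofs are below) =====
def Claim_equal_practice_problem3c : Prop := ∀ (sequence : List Int), Dom_practice_problem3c sequence → Spec_practice_problem3c sequence (practice_problem3c sequence)

-- ===== LEMMAS AND PROOFS =====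

-- reference list: indices k ≤ j < n-1 with s[j] = s[j+1]
def pp3Ref (s : List Int) (n : Int) (k : Int) : List Int :=
  if _h : k < n - 1 then
    (if pvGet s k = pvGet s (k + 1) then [k] else []) ++ pp3Ref s n (k + 1)
  else []
termination_by (n - 1 - k).toNat
decreasing_by omega

theorem pp3Ref_stop (s : List Int) (n k : Int) (h : ¬ k < n - 1) : pp3Ref s n k = [] := by
  unfold pp3Ref; simp [h]

theorem pp3GoA_ref (s : List Int) (n : Int) : ∀ (k : Int) (acc : List Int),
    pp3GoA s n (PySem.List.pyRange k n 1) acc = acc ++ pp3Ref s n k := by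
  intro k
  induction hk : (n - k).toNat using Nat.strong_induction_on generalizing k with
  | _ m ih =>
    intro acc
    by_cases hkn : k < n
    · rw [PySem.List.pyRange_one_cons hkn]
      by_cases hbrk : k = n - 1
      · simp [pp3GoA, hbrk, pp3Ref_stop s n (n - 1) (by omega)]
      · have hlt : k < n - 1 := by omega
        rw [pp3Ref]
        simp only [pp3GoA, hbrk, if_false, dif_pos hlt]
        have hrec : ((n : Int) - (k + 1)).toNat < m := by omega
        by_cases he : pvGet s k = pvGet s (k + 1)
        · rw [if_pos he, ih _ hrec (k + 1) rfl, if_pos he]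
          simp
        · rw [if_neg he, ih _ hrec (k + 1) rfl, if_neg he]
          simp
    · rw [PySem.List.pyRange_one_eq_nil (by omega), pp3Ref_stop s n k (by omega)]
      simp [pp3GoA]

theorem pp3Inner_props (s : List Int) (n start : Int) : ∀ e,
    e ≤ pp3Inner s n start e ∧
    ¬ (pp3Inner s n start e < n ∧ pvGet s (pp3Inner s n start e) = pvGet s start) ∧
    (∀ j, e ≤ j → j < pp3Inner s n start e → pvGet s j = pvGet s start) ∧
    (e ≤ n → pp3Inner s n start e ≤ n) := by
  intro e
  induction hd : (n - e).toNat using Nat.strong_induction_on generalizing e with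
  | _ m ih =>
    by_cases h : e < n ∧ pvGet s e = pvGet s start
    · rw [pp3Inner, dif_pos h]
      obtain ⟨ih1, ih2, ih3, ih4⟩ := ih ((n : Int) - (e + 1)).toNat (by omega) (e + 1) rfl
      refine ⟨by omega, ih2, ?_, fun _ => ih4 (by omega)⟩
      intro j hj1 hj2
      rcases eq_or_lt_of_le hj1 with rfl | hgt
      · exact h.2
      · exact ih3 j (by omega) hj2
    · rw [pp3Inner, dif_neg h]
      exact ⟨le_refl e, h, fun j h1 h2 => absurd (lt_of_le_of_lt h1 h2) (lt_irrefl e), fun h => h⟩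

-- a maximal equal run collapses into a contiguous index block of the reference list
theorem pp3Ref_run (s : List Int) (n : Int) : ∀ (start e : Int), start < e →
    (∀ j, start ≤ j → j < e → pvGet s j = pvGet s start) → e ≤ n →
    (e = n ∨ pvGet s e ≠ pvGet s start) →
    pp3Ref s n start = PySem.List.pyRange start (e - 1) 1 ++ pp3Ref s n e := by
  intro start e
  induction hd : (e - start).toNat using Nat.strong_induction_on generalizing start with
  | _ m ih =>
    intro hlt hrun hen hstop
    rcases eq_or_lt_of_le (show start + 1 ≤ e by omega) with heq | hgt
    · -- e = start + 1 : empty block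
      rw [PySem.List.pyRange_one_eq_nil (by omega), List.nil_append]
      rcases hstop with hEn | hne
      · rw [pp3Ref_stop s n start (by omega), pp3Ref_stop s n e (by omega)]
      · by_cases hb : start < n - 1
        · have hne' : ¬ pvGet s start = pvGet s (start + 1) := fun hx => hne (heq ▸ hx.symm)
          rw [pp3Ref, dif_pos hb, if_neg hne', List.nil_append, heq]
        · rw [pp3Ref_stop s n start hb, pp3Ref_stop s n e (by omega)]
    · -- e > start + 1 : index start is in, recurse at start + 1
      have hadj : pvGet s (start + 1) = pvGet s start := hrun (start + 1) (by omega) hgt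
      have hb : start < n - 1 := by omega
      rw [pp3Ref]
      simp only [dif_pos hb, if_pos hadj.symm]
      rw [ih ((e : Int) - (start + 1)).toNat (by omega) (start + 1) rfl (by omega)
            (fun j h1 h2 => (hrun j (by omega) h2).trans hadj.symm) hen
            (by rcases hstop with h | h; · exact Or.inl h
                · exact Or.inr (fun hx => h (hx.trans hadj)))]
      rw [show PySem.List.pyRange start (e - 1) 1 = start :: PySem.List.pyRange (start + 1) (e - 1) 1
            from PySem.List.pyRange_one_cons (by omega)]
      simp

theorem pp3Outer_ref (s : List Int) (n : Int) : ∀ (start : Int) (acc : List Int),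
    pp3Outer s n start acc = acc ++ pp3Ref s n start := by
  intro start
  induction hd : (n - start).toNat using Nat.strong_induction_on generalizing start with
  | _ m ih =>
    intro acc
    by_cases hs : start < n
    · obtain ⟨h1, h2, h3, h4⟩ := pp3Inner_props s n start (start + 1)
      revert h1 h2 h3 h4
      generalize he : pp3Inner s n start (start + 1) = e
      intro h1 h2 h3 h4
      have hen : e ≤ n := h4 (by omega)
      rw [pp3Outer, dif_pos hs, he]
      rw [ih ((n : Int) - e).toNat (by omega) e rfl]
      rw [pp3Ref_run s n start e (by omega)
            (fun j hj1 hj2 => by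
              rcases eq_or_lt_of_le hj1 with rfl | hgt
              · rfl
              · exact h3 j (by omega) hj2)
            hen
            (by rcases eq_or_lt_of_le hen with hEq | hLt
                · exact Or.inl hEq
                · exact Or.inr fun hx => h2 ⟨hLt, hx⟩)]
      simp
    · rw [pp3Outer, dif_neg hs, pp3Ref_stop s n start (by omega), List.append_nil]

-- ===== VERDICT (by name: the statement is the Claim_ definition above) =====
theorem practice_problem3c_spec : Claim_equal_practice_problem3c := by
  intro sequence _
  unfold Spec_practice_problem3c practice_problem3c practice_problem3c_alt
  rw [pp3GoA_ref, pp3Outer_ref]
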